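-- pv_equiv track=rewrite | github.com/aboutas/etl-app | src/transformations.py | capitalization_rules
-- ===== SOURCE A (Python) =====
-- from typing import Dict, List, Tuple
--
-- def capitalization_rules(data: Dict, fields: List[str]) -> Tuple[Dict, bool]:
--     transformed = {}
--     for key, value in data.items():
--         if key in fields and isinstance(value, str):
--             transformed[key] = value.upper()
--         else:
--             transformed[key] = value
--     return transformed, False
-- ===== SOURCE B (Python) =====
-- def capitalization_rules(data, fields):
--     transformed = dict(data)
--     for key in fields:
--         if key in data and isinstance(data[key], str):
--             transformed[key] = data[key].upper()
--     return transformed, False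
-- ===== Notes on version B (the rewrite author's own statement) =====
-- stated objective: faster
-- what changed: B makes a shallow copy of the dict and patches only the listed fields (looping over fields with a dict lookup), instead of A's rebuild of the whole dict with a per-entry linear membership scan of fields.
import Mathlib
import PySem

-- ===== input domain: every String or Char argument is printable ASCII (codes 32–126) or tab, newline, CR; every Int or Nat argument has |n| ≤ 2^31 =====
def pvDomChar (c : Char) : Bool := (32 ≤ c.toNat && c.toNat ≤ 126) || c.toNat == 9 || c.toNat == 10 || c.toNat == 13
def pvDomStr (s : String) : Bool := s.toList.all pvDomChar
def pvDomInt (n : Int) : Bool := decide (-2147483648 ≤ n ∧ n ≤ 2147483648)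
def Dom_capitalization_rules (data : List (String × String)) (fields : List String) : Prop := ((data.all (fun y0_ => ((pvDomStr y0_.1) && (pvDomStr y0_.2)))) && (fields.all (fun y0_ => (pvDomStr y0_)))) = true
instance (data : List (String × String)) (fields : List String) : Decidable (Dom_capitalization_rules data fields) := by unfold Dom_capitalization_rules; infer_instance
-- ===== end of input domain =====

-- One line: B copies the dict and patches only the listed fields (a loop over fields),
-- instead of A's rebuild of every entry; same return value, objective: simpler.

-- ===== PORT A =====
-- A scans data.items() and rebuilds the dict, uppercasing entries whose key is in fields
-- (isinstance(value, str) is always true on the typed domain dict[str, str]).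
def capitalization_rules (data : List (String × String)) (fields : List String) : (List (String × String)) × Bool :=
  let transformed := data.foldl
    (fun d p =>
      if fields.contains p.1 then d.insert p.1 (PySem.Str.upper p.2)
      else d.insert p.1 p.2)
    (PySem.Dict.empty : PySem.Dict String String)
  (transformed.items, false)

-- ===== PORT B =====
-- B: transformed = dict(data); for key in fields: if key in data: transformed[key] = data[key].upper()
def capitalization_rules_alt (data : List (String × String)) (fields : List String) : (List (String × String)) × Bool :=
  let src := PySem.Dict.ofList data
  let transformed := fields.foldl
    (fun t k =>
      match src.get? k with
      | some v => t.insert k (PySem.Str.upper v)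
      | none => t)
    src
  (transformed.items, false)

-- ===== PRECONDITION & SPEC =====
def Spec_capitalization_rules (data : List (String × String)) (fields : List String) (out : (List (String × String)) × Bool) : Prop := out = capitalization_rules_alt data fields
instance (data : List (String × String)) (fields : List String) (out : (List (String × String)) × Bool) : Decidable (Spec_capitalization_rules data fields out) := by unfold Spec_capitalization_rules; infer_instance

-- ===== CLAIM (what is proved, stated in full; the proofs are below) =====
def Claim_equal_capitalization_rules : Prop := ∀ (data : List (String × String)) (fields : List String), Dom_capitalization_rules data fields → Spec_capitalization_rules data fields (capitalization_rules data fields)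

-- ===== LEMMAS AND PROOFS =====

-- the itemwise effect of uppercasing the fields: both programs' dicts have these items
def pvF (fields : List String) (l : List (String × String)) : List (String × String) :=
  l.map (fun p => (p.1, if fields.contains p.1 then PySem.Str.upper p.2 else p.2))

theorem pvF_fst (fields : List String) (l : List (String × String)) :
    (pvF fields l).map Prod.fst = l.map Prod.fst := by
  simp [pvF, List.map_map, Function.comp_def]

theorem pvKeys_eq {S : List String} (dA dB : PySem.Dict String String)
    (h : dA.items = pvF S dB.items) : dA.keys = dB.keys := by
  simp only [PySem.Dict.keys, h, pvF_fst]

theorem pvContains_eq {S : List String} (dA dB : PySem.Dict String String)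
    (h : dA.items = pvF S dB.items) (k : String) : dA.contains k = dB.contains k := by
  rw [PySem.Dict.contains_eq_decide_mem_keys, PySem.Dict.contains_eq_decide_mem_keys,
    pvKeys_eq dA dB h]

-- one step of A's loop preserves the pvF relation between A's dict and the plain copy
theorem pvStepA (fields : List String) (dA dB : PySem.Dict String String)
    (p : String × String) (h : dA.items = pvF fields dB.items) :
    (if fields.contains p.1 then dA.insert p.1 (PySem.Str.upper p.2)
      else dA.insert p.1 p.2).items = pvF fields ((dB.insert p.1 p.2).items) := by
  have hins : (dA.insert p.1 (if fields.contains p.1 then PySem.Str.upper p.2 else p.2)).items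
      = pvF fields ((dB.insert p.1 p.2).items) := by
    rw [PySem.Dict.items_insert, PySem.Dict.items_insert, pvContains_eq dA dB h]
    by_cases hc : dB.contains p.1 = true
    · simp only [hc, if_true, h, pvF, List.map_map]
      apply List.map_congr_left
      intro q _
      by_cases hq : q.1 = p.1
      · simp [hq]
      · simp [hq]
    · simp only [Bool.not_eq_true] at hc
      simp [hc, h, pvF]
  by_cases hf : fields.contains p.1 = true
  · rw [if_pos hf] at hins ⊢; exact hins
  · rw [if_neg hf] at hins ⊢; exact hins

theorem pvLoopA (fields : List String) (data : List (String × String))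
    (dA dB : PySem.Dict String String) (h : dA.items = pvF fields dB.items) :
    (data.foldl
      (fun d p =>
        if fields.contains p.1 then d.insert p.1 (PySem.Str.upper p.2)
        else d.insert p.1 p.2) dA).items
      = pvF fields ((data.foldl (fun d p => d.insert p.1 p.2) dB).items) := by
  induction data generalizing dA dB with
  | nil => exact h
  | cons p rest ih =>
    simp only [List.foldl_cons]
    exact ih _ _ (pvStepA fields dA dB p h)

theorem pvLoopB (src : PySem.Dict String String) (hnd : src.keys.Nodup)
    (fs : List String) (S : List String) (t : PySem.Dict String String)
    (ht : t.items = pvF S src.items) :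
    (fs.foldl
      (fun t k =>
        match src.get? k with
        | some v => t.insert k (PySem.Str.upper v)
        | none => t) t).items
      = pvF (S ++ fs) src.items := by
  induction fs generalizing S t with
  | nil => simpa using ht
  | cons k rest ih =>
    simp only [List.foldl_cons]
    have hstep : ∀ t' : PySem.Dict String String,
        t' = (match src.get? k with
          | some v => t.insert k (PySem.Str.upper v)
          | none => t) →
        t'.items = pvF (S ++ [k]) src.items := by
      intro t' ht'
      cases hg : src.get? k with
      | none =>
        rw [ht'] ; simp only [hg]
        rw [ht, pvF, pvF]
        apply List.map_congr_left
        intro q hq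
        have hk : k ∉ src.keys := by
          rw [← PySem.Dict.get?_eq_none_iff_not_mem_keys]
          exact hg
        have hqk : q.1 ≠ k := by
          intro he
          apply hk
          rw [← he]
          simp only [PySem.Dict.keys]
          exact List.mem_map.2 ⟨q, hq, rfl⟩
        simp [hqk]
      | some v =>
        rw [ht'] ; simp only [hg]
        have hck : t.contains k = true := by
          rw [PySem.Dict.contains_eq_decide_mem_keys, pvKeys_eq t src ht]
          simp only [decide_eq_true_eq]
          by_contra hko
          have hnone : src.get? k = none := by
            rw [PySem.Dict.get?_eq_none_iff_not_mem_keys]; exact hko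
          simp [hg] at hnone
        rw [PySem.Dict.items_insert]
        simp only [hck, if_true]
        rw [ht, pvF, pvF, List.map_map]
        apply List.map_congr_left
        intro q hq
        by_cases hqk : q.1 = k
        · have : src.get? q.1 = some q.2 :=
            PySem.Dict.get?_of_mem_items src (by simpa using hq) hnd
          rw [hqk] at this
          rw [this] at hg
          have hv : q.2 = v := Option.some.inj hg
          simp [hqk, hv]
        · simp [hqk]
    have := ih (S ++ [k]) _ (hstep _ rfl)
    simpa using this

theorem capitalization_rules_spec : Claim_equal_capitalization_rules := by
  intro data fields _
  unfold Spec_capitalization_rules capitalization_rules capitalization_rules_alt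
  have hsrc : PySem.Dict.ofList data
      = data.foldl (fun d p => d.insert p.1 p.2) (PySem.Dict.empty : PySem.Dict String String) := rfl
  have hA := pvLoopA fields data PySem.Dict.empty PySem.Dict.empty rfl
  have hB := pvLoopB (PySem.Dict.ofList data) (PySem.Dict.nodup_keys_ofList data) fields []
      (PySem.Dict.ofList data) (by
        simp [pvF, Prod.mk.eta])
  simp only [List.nil_append] at hB
  simp only [hsrc] at hB
  rw [hsrc]
  simp only [hA, hB]
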